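-- pv_equiv track=rewrite | github.com/tushiqi/MAnorm2_utils | build/lib/MAnorm2_utils/genomic_bin.py | sort_merge_peak
-- ===== SOURCE A (Python) =====
-- def modified_median(x):
--     """
-- Given a list of objects, sort them in place and return the median one.
-- Note: the returned object is guaranteed to be one of those in the list.
--
-- """
--     x.sort()
--     return x[(len(x) - 1) // 2]
--
-- def sort_merge_peak(peaks, min_gap=None, no_smt=False):
--     """
-- This function sorts a list of peaks into a dictionary structure, where peaks for
-- each chromatin are stored in a list and sorted based on (start, end). A peak
-- should be represented as (chrom, start, end, summit, ID, ...), where the start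
-- coordinate must be strictly less than the end site.
--
-- Supplying a positive integer to "min_gap" merges neighboring peaks with a
-- distance less than "min_gap" bases. In this case, summit of each merged peak is
-- taken as the modified median of the peak summits involved, and its ID is taken
-- as that of the peak with the minimum start coordinate. Setting "no_smt" to True
-- will take None as the summit of each resulting peak. By default, the merging
-- process is repressed.
--
-- Return a dictionary:
-- { chrom: [(start, end, summit, ID), ...], ... }, where peaks for each chromatin
-- have been sorted based on (start, end).
--
-- """
--     ch2peaks = {}
--     for peak in peaks:
--         ch = peak[0]
--         if ch in ch2peaks:
--             ch2peaks[ch].append(peak[1:5])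
--         else:
--             ch2peaks[ch] = [peak[1:5]]
--
--     for ch in ch2peaks:
--         ch2peaks[ch].sort(key=lambda x: x[:2])
--     if min_gap is None:
--         return ch2peaks
--
--     for ch in ch2peaks:
--         ps = ch2peaks[ch]
--         s, rightmost, summit, id = ps[0]
--         summits = [summit]
--         mps = []
--         for peak in ps[1:]:
--             start, end, summit, ID = peak
--             if start - rightmost >= min_gap:
--                 mps.append((s, rightmost, None if no_smt else modified_median(summits), id))
--                 s, rightmost, summits, id = start, end, [summit], ID
--             else:
--                 if end > rightmost:
--                     rightmost = end
--                 summits.append(summit)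
--         mps.append((s, rightmost, None if no_smt else modified_median(summits), id))
--         ch2peaks[ch] = mps
--     return ch2peaks
-- ===== SOURCE B (Python) =====
-- def _reduce_cluster(c, no_smt):
--     # One merged peak from a cluster of overlapping/near peaks (sorted by (start, end)):
--     # start/ID come from the first (min-start) peak, end is the cluster's max end,
--     # summit is the modified median of the cluster's summits (None when no_smt).
--     start = c[0][0]
--     end = max(t[1] for t in c)
--     ID = c[0][3]
--     if no_smt:
--         smt = None
--     else:
--         ss = sorted(t[2] for t in c)
--         smt = ss[(len(ss) - 1) // 2]
--     return (start, end, smt, ID)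
--
--
-- def _clusters(ps, min_gap):
--     # Partition a sorted peak list into maximal runs whose gap to the running
--     # rightmost end is < min_gap.
--     out = []
--     cur = [ps[0]]
--     rightmost = ps[0][1]
--     for t in ps[1:]:
--         if t[0] - rightmost >= min_gap:
--             out.append(cur)
--             cur = [t]
--             rightmost = t[1]
--         else:
--             cur.append(t)
--             if t[1] > rightmost:
--                 rightmost = t[1]
--     out.append(cur)
--     return out
--
--
-- def _per_chrom(ps, min_gap, no_smt):
--     ps = sorted(ps, key=lambda t: (t[0], t[1]))
--     if min_gap is None:
--         return ps
--     return [_reduce_cluster(c, no_smt) for c in _clusters(ps, min_gap)]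
--
--
-- def sort_merge_peak(peaks, min_gap=None, no_smt=False):
--     groups = {}
--     for p in peaks:
--         groups[p[0]] = groups.get(p[0], []) + [p[1:5]]
--     return {ch: _per_chrom(ps, min_gap, no_smt) for ch, ps in groups.items()}
-- ===== Notes on version B (the rewrite author's own statement) =====
-- stated objective: alternative
-- what changed: A's fused per-chromosome merge loop (five running accumulators building merged peaks on the fly) is replaced by a two-phase decomposition: partition each sorted chromosome list into clusters by the rightmost-gap rule, then reduce each cluster independently to one peak (first peak's start/ID, max end, modified median of summits); grouping uses get-with-default instead of a contains/append branch.
import Mathlib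
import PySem

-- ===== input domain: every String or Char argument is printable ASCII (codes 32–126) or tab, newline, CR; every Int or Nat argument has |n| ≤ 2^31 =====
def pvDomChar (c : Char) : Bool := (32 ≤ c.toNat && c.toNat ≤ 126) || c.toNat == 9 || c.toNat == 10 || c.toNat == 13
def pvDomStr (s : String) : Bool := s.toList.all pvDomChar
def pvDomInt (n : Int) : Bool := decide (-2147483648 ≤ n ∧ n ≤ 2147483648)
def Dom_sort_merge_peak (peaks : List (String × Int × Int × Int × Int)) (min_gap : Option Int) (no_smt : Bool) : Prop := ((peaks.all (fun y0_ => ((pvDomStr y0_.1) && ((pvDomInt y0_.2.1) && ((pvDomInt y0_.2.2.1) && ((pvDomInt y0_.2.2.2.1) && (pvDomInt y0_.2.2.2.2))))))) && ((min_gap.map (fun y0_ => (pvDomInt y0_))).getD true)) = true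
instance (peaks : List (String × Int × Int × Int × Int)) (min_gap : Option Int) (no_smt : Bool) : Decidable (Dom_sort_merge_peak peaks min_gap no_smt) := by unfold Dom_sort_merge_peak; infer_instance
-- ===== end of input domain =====

-- B replaces A's fused merge loop by a two-phase decomposition (partition each sorted
-- chromosome list into clusters, then reduce each cluster to one peak); same cost,
-- objective: alternative decomposition. Return-value equivalence only (A and B only
-- mutate internal lists). The Lean result type forces 'some' around the raw int summit
-- of the unmerged (min_gap = None) branch in both ports.

-- ===== PORT A =====
-- modified_median(x): sort and take x[(len(x)-1)//2]; only ever called on nonempty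
-- lists here, so the '.getD 0' index guard is mere totalization (Python raises on []).
def modified_median (x : List Int) : Int :=
  let y := PySem.List.sorted x (fun v => v) false
  (PySem.List.pyGet? y (PySem.Int.floordiv (PySem.List.len y - 1) 2)).getD 0

-- the body of A's inner merge loop; state = (s, rightmost, summits, id, mps)
def pvStepA (g : Int) (no_smt : Bool)
    (st : Int × Int × List Int × Int × List (Int × Int × Option Int × Int))
    (p : Int × Int × Int × Int) :
    Int × Int × List Int × Int × List (Int × Int × Option Int × Int) :=
  if p.1 - st.2.1 ≥ g then
    (p.1, p.2.1, [p.2.2.1], p.2.2.2,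
      st.2.2.2.2 ++ [(st.1, st.2.1, if no_smt then none else some (modified_median st.2.2.1), st.2.2.2.1)])
  else
    (st.1, if p.2.1 > st.2.1 then p.2.1 else st.2.1, st.2.2.1 ++ [p.2.2.1], st.2.2.2.1, st.2.2.2.2)

-- A's per-chromosome merge ("for peak in ps[1:]: …" plus the final append);
-- the [] case is unreachable (groups are nonempty; Python's ps[0] would raise there)
def pvMergeA (g : Int) (no_smt : Bool) (ps : List (Int × Int × Int × Int)) :
    List (Int × Int × Option Int × Int) :=
  match ps with
  | [] => []
  | p0 :: rest =>
    let st := rest.foldl (pvStepA g no_smt) (p0.1, p0.2.1, [p0.2.2.1], p0.2.2.2, [])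
    st.2.2.2.2 ++ [(st.1, st.2.1, if no_smt then none else some (modified_median st.2.2.1), st.2.2.2.1)]

def sort_merge_peak (peaks : List (String × Int × Int × Int × Int)) (min_gap : Option Int) (no_smt : Bool) : List (String × List (Int × Int × Option Int × Int)) :=
  -- ch2peaks grouping loop: "if ch in ch2peaks: append else: = [peak[1:5]]"
  let d : PySem.Dict String (List (Int × Int × Int × Int)) :=
    peaks.foldl (fun d p =>
      if d.contains p.1 then d.modify p.1 [] (fun l => l ++ [p.2])
      else d.insert p.1 [p.2]) PySem.Dict.empty
  -- "for ch in ch2peaks: ch2peaks[ch].sort(key=lambda x: x[:2])": in-place value update, keys unchanged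
  let d2 : PySem.Dict String (List (Int × Int × Int × Int)) :=
    PySem.Dict.mk (d.items.map (fun q => (q.1, PySem.List.sorted2 q.2 (fun t => t.1) (fun t => t.2.1))))
  match min_gap with
  | none => d2.items.map (fun q => (q.1, q.2.map (fun t => (t.1, t.2.1, some t.2.2.1, t.2.2.2))))
  | some g => d2.items.map (fun q => (q.1, pvMergeA g no_smt q.2))

-- ===== PORT B =====
-- reduce one (nonempty) cluster to a single merged peak; the [] case is unreachable
-- (clusters are nonempty; Python's c[0] would raise there)
def pvReduceCluster (c : List (Int × Int × Int × Int)) (no_smt : Bool) : Int × Int × Option Int × Int :=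
  match c with
  | [] => (0, 0, none, 0)
  | p0 :: _ =>
    let e := (PySem.List.max? (c.map (fun t => t.2.1)) (fun v => v)).getD 0
    let smt : Option Int :=
      if no_smt then none
      else
        let ss := PySem.List.sorted (c.map (fun t => t.2.2.1)) (fun v => v) false
        some ((PySem.List.pyGet? ss (PySem.Int.floordiv (PySem.List.len ss - 1) 2)).getD 0)
    (p0.1, e, smt, p0.2.2.2)

-- the body of B's clustering loop; state = (out, cur, rightmost)
def pvStepB (g : Int)
    (st : List (List (Int × Int × Int × Int)) × List (Int × Int × Int × Int) × Int)
    (t : Int × Int × Int × Int) :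
    List (List (Int × Int × Int × Int)) × List (Int × Int × Int × Int) × Int :=
  if t.1 - st.2.2 ≥ g then (st.1 ++ [st.2.1], [t], t.2.1)
  else (st.1, st.2.1 ++ [t], if t.2.1 > st.2.2 then t.2.1 else st.2.2)

def pvClusters (ps : List (Int × Int × Int × Int)) (g : Int) : List (List (Int × Int × Int × Int)) :=
  match ps with
  | [] => []
  | p0 :: rest =>
    let st := rest.foldl (pvStepB g) ([], [p0], p0.2.1)
    st.1 ++ [st.2.1]

def pvPerChrom (ps0 : List (Int × Int × Int × Int)) (min_gap : Option Int) (no_smt : Bool) :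
    List (Int × Int × Option Int × Int) :=
  let ps := PySem.List.sorted2 ps0 (fun t => t.1) (fun t => t.2.1)
  match min_gap with
  | none => ps.map (fun t => (t.1, t.2.1, some t.2.2.1, t.2.2.2))
  | some g => (pvClusters ps g).map (fun c => pvReduceCluster c no_smt)

def sort_merge_peak_alt (peaks : List (String × Int × Int × Int × Int)) (min_gap : Option Int) (no_smt : Bool) : List (String × List (Int × Int × Option Int × Int)) :=
  -- "groups[p[0]] = groups.get(p[0], []) + [p[1:5]]"
  let groups : PySem.Dict String (List (Int × Int × Int × Int)) :=
    peaks.foldl (fun d p => d.insert p.1 (d.getD p.1 [] ++ [p.2])) PySem.Dict.empty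
  -- dict comprehension over groups.items(): keys distinct, so items map in order
  groups.items.map (fun q => (q.1, pvPerChrom q.2 min_gap no_smt))

-- ===== PRECONDITION & SPEC =====
def Spec_sort_merge_peak (peaks : List (String × Int × Int × Int × Int)) (min_gap : Option Int) (no_smt : Bool) (out : List (String × List (Int × Int × Option Int × Int))) : Prop := out = sort_merge_peak_alt peaks min_gap no_smt
instance (peaks : List (String × Int × Int × Int × Int)) (min_gap : Option Int) (no_smt : Bool) (out : List (String × List (Int × Int × Option Int × Int))) : Decidable (Spec_sort_merge_peak peaks min_gap no_smt out) := by unfold Spec_sort_merge_peak; exact @instDecidableEqList _ instDecidableEqProd _ _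

-- ===== CLAIM (what is proved, stated in full; the proofs are below) =====
def Claim_equal_sort_merge_peak : Prop := ∀ (peaks : List (String × Int × Int × Int × Int)) (min_gap : Option Int) (no_smt : Bool), Dom_sort_merge_peak peaks min_gap no_smt → Spec_sort_merge_peak peaks min_gap no_smt (sort_merge_peak peaks min_gap no_smt)

-- ===== LEMMAS AND PROOFS =====

-- the two grouping loop bodies build the same dict update
theorem pvGroupStep_eq (d : PySem.Dict String (List (Int × Int × Int × Int)))
    (p : String × Int × Int × Int × Int) :
    (if d.contains p.1 then d.modify p.1 [] (fun l => l ++ [p.2]) else d.insert p.1 [p.2])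
      = d.insert p.1 (d.getD p.1 [] ++ [p.2]) := by
  by_cases h : d.contains p.1
  · simp [h, PySem.Dict.modify]
  · simp only [Bool.not_eq_true] at h
    rw [PySem.Dict.getD_of_not_contains _ _ h]
    simp [h]

-- "if b > a then b else a" is max
theorem pvIfMax (a b : Int) : (if b > a then b else a) = max a b := by
  rw [max_def]; split_ifs <;> omega

-- closing a cluster: A's appended tuple IS the reduction of that cluster
theorem pvClose_eq_reduce (no_smt : Bool) (c0 : Int × Int × Int × Int)
    (ct : List (Int × Int × Int × Int)) (rm : Int)
    (hrm : rm = (ct.map (fun t => t.2.1)).foldl max c0.2.1) :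
    (c0.1, rm, (if no_smt then none else some (modified_median (c0.2.2.1 :: ct.map (fun t => t.2.2.1)))), c0.2.2.2)
      = pvReduceCluster (c0 :: ct) no_smt := by
  subst hrm
  simp only [pvReduceCluster, List.map_cons, PySem.List.max?_id_cons, Option.getD_some,
    modified_median]

-- the merge-loop invariant: A's fused state tracks B's (clusters, current, rightmost)
theorem pvFold_rel (g : Int) (no_smt : Bool) :
    ∀ (rest : List (Int × Int × Int × Int)) (out : List (List (Int × Int × Int × Int)))
      (c0 : Int × Int × Int × Int) (ct : List (Int × Int × Int × Int)) (rm : Int),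
      rm = (ct.map (fun t => t.2.1)).foldl max c0.2.1 →
      (let stA := rest.foldl (pvStepA g no_smt)
          (c0.1, rm, c0.2.2.1 :: ct.map (fun t => t.2.2.1), c0.2.2.2,
           out.map (fun c => pvReduceCluster c no_smt))
       stA.2.2.2.2 ++ [(stA.1, stA.2.1, if no_smt then none else some (modified_median stA.2.2.1), stA.2.2.2.1)])
      = (let stB := rest.foldl (pvStepB g) (out, c0 :: ct, rm)
         (stB.1 ++ [stB.2.1]).map (fun c => pvReduceCluster c no_smt)) := by
  intro rest
  induction rest with
  | nil =>
    intro out c0 ct rm hrm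
    simp only [List.foldl_nil, List.map_append, List.map_cons, List.map_nil]
    rw [pvClose_eq_reduce no_smt c0 ct rm hrm]
  | cons t rest ih =>
    intro out c0 ct rm hrm
    simp only [List.foldl_cons]
    by_cases hb : t.1 - rm ≥ g
    · have hA : pvStepA g no_smt
          (c0.1, rm, c0.2.2.1 :: ct.map (fun t => t.2.2.1), c0.2.2.2,
           out.map (fun c => pvReduceCluster c no_smt)) t
          = (t.1, t.2.1, [t.2.2.1], t.2.2.2,
             (out ++ [c0 :: ct]).map (fun c => pvReduceCluster c no_smt)) := by
        simp only [pvStepA, hb, if_pos, List.map_append, List.map_cons, List.map_nil]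
        rw [pvClose_eq_reduce no_smt c0 ct rm hrm]
      have hB : pvStepB g (out, c0 :: ct, rm) t = (out ++ [c0 :: ct], [t], t.2.1) := by
        simp [pvStepB, hb]
      rw [hA, hB]
      exact ih (out ++ [c0 :: ct]) t [] t.2.1 (by simp)
    · have hA : pvStepA g no_smt
          (c0.1, rm, c0.2.2.1 :: ct.map (fun t => t.2.2.1), c0.2.2.2,
           out.map (fun c => pvReduceCluster c no_smt)) t
          = (c0.1, if t.2.1 > rm then t.2.1 else rm,
             c0.2.2.1 :: (ct ++ [t]).map (fun t => t.2.2.1), c0.2.2.2,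
             out.map (fun c => pvReduceCluster c no_smt)) := by
        simp [pvStepA, hb]
      have hB : pvStepB g (out, c0 :: ct, rm) t
          = (out, c0 :: (ct ++ [t]), if t.2.1 > rm then t.2.1 else rm) := by
        simp [pvStepB, hb]
      rw [hA, hB]
      refine ih out c0 (ct ++ [t]) _ ?_
      simp only [List.map_append, List.map_cons, List.map_nil, List.foldl_append, List.foldl_cons,
        List.foldl_nil, ← hrm, pvIfMax]

-- A's fused merge equals B's partition-then-reduce, per chromosome
theorem pvMerge_eq (g : Int) (no_smt : Bool) (ps : List (Int × Int × Int × Int)) :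
    pvMergeA g no_smt ps = (pvClusters ps g).map (fun c => pvReduceCluster c no_smt) := by
  cases ps with
  | nil => rfl
  | cons p0 rest =>
    simpa only [pvMergeA, pvClusters] using
      pvFold_rel g no_smt rest [] p0 [] p0.2.1 (by simp)

-- ===== VERDICT (by name: the statement is the Claim_ definition above) =====
theorem sort_merge_peak_spec : Claim_equal_sort_merge_peak := by
  intro peaks min_gap no_smt _
  unfold Spec_sort_merge_peak sort_merge_peak sort_merge_peak_alt
  have hgrp :
      peaks.foldl (fun d p =>
        if d.contains p.1 then d.modify p.1 [] (fun l => l ++ [p.2])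
        else d.insert p.1 [p.2]) PySem.Dict.empty
      = peaks.foldl (fun d p => d.insert p.1 (d.getD p.1 [] ++ [p.2])) PySem.Dict.empty := by
    exact PySem.List.foldl_congr_mem _ _ _ _ (fun d p _ => pvGroupStep_eq d p)
  rw [hgrp]
  cases min_gap with
  | none =>
    simp only [List.map_map]
    refine List.map_congr_left (fun q _ => ?_)
    rfl
  | some g =>
    simp only [List.map_map]
    refine List.map_congr_left (fun q _ => ?_)
    simp only [Function.comp, pvPerChrom]
    rw [pvMerge_eq]
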